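-- pv_equiv track=rewrite | github.com/johannesbuchholz/wall-run | Utils/HelperFunctions.py | replace_hex_color
-- ===== SOURCE A (Python) =====
-- def replace_hex_color(string, col):
--     """
--     Given field string this function finds all occurences of hex color strings like "#ff00ff" and replaces them
--     by the given color string.
--
--     :param string: string, expects that only hex colors start with an "#".
--     :return: string, resulting string
--     """
--     out = ""
--     i = 0
--     while i < len(string):
--         if string[i] == "#":
--             out += col
--             i += 7
--         else:
--             out += string[i]
--             i += 1
--     return out
-- ===== SOURCE B (Python) =====
-- def replace_hex_color(string, col):
--     parts = []
--     rest = string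
--     while True:
--         i = rest.find('#')
--         if i < 0:
--             parts.append(rest)
--             break
--         parts.append(rest[:i])
--         parts.append(col)
--         rest = rest[i + 7:]
--     return ''.join(parts)
-- ===== Notes on version B (the rewrite author's own statement) =====
-- stated objective: faster
-- what changed: Replaces the per-character index walk that concatenates one character at a time with a loop that uses str.find to jump directly to each '#', collects whole slices in a list and joins them once.
import Mathlib
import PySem

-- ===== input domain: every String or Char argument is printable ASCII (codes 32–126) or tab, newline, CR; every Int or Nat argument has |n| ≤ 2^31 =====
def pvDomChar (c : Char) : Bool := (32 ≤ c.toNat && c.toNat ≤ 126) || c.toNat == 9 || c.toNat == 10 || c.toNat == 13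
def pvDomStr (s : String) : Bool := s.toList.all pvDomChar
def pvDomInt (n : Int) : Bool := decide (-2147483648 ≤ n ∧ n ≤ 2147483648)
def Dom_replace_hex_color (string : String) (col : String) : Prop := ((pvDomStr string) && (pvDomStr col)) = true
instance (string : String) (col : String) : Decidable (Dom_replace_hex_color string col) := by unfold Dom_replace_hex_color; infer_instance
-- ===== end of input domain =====

-- B jumps between '#' occurrences with str.find and joins whole slices once, instead of A's per-character index walk with repeated concatenation (objective: faster; measured).

-- ===== PORT A =====
-- A: while i < len(string): if string[i] == '#': out += col; i += 7 else: out += string[i]; i += 1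
-- ported as recursion on the remaining suffix (i += 7 = consume the '#' and drop 6 more)
def goA (col : List Char) : List Char → List Char
  | [] => []
  | c :: rest =>
      if c = '#' then col ++ goA col (rest.drop 6)
      else c :: goA col rest
  termination_by l => l.length
  decreasing_by all_goals (simp; try omega)

def replace_hex_color (string : String) (col : String) : String :=
  String.ofList (goA col.toList string.toList)

-- ===== PORT B =====
-- B: loop: i = rest.find('#'); if i < 0: parts.append(rest); break
--          parts.append(rest[:i]); parts.append(col); rest = rest[i+7:]
--    return ''.join(parts)
def goB (col : List Char) (s : List Char) : List (List Char) :=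
  let i := PySem.Chars.find s ['#']
  if i < 0 then [s]
  else s.take i.toNat :: col :: goB col (s.drop (i.toNat + 7))
  termination_by s.length
  decreasing_by
    have hne : PySem.Chars.find s ['#'] ≠ -1 := by omega
    have hinf := (PySem.Chars.find_ne_neg_one_iff s ['#']).mp hne
    have hs : s ≠ [] := by rintro rfl; simp at hinf
    have hlen : 0 < s.length := List.length_pos_of_ne_nil hs
    simp
    omega

def replace_hex_color_alt (string : String) (col : String) : String :=
  String.ofList (PySem.Chars.join [] (goB col.toList string.toList))

-- ===== PRECONDITION & SPEC =====
def Spec_replace_hex_color (string : String) (col : String) (out : String) : Prop := out = replace_hex_color_alt string col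
instance (string : String) (col : String) (out : String) : Decidable (Spec_replace_hex_color string col out) := by unfold Spec_replace_hex_color; infer_instance

-- ===== CLAIM (what is proved, stated in full; the proofs are below) =====
def Claim_equal_replace_hex_color : Prop := ∀ (string : String) (col : String), Dom_replace_hex_color string col → Spec_replace_hex_color string col (replace_hex_color string col)

-- ===== LEMMAS AND PROOFS =====

-- A copies the string unchanged where there is no '#'
theorem goA_no_hash (col : List Char) (s : List Char) (h : '#' ∉ s) : goA col s = s := by
  induction s with
  | nil => simp [goA]
  | cons c rest ih =>
      simp at h
      have hc : c ≠ '#' := fun hc => h.1 hc.symm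
      rw [goA]
      simp [hc, ih h.2]

-- A's walk up to the first '#' (at index n) copies the prefix, emits col, and resumes 7 further
theorem goA_skip (col : List Char) (n : Nat) (s : List Char)
    (hget : ['#'] <+: s.drop n)
    (hbefore : ∀ j, j < n → ¬ (['#'] <+: s.drop j)) :
    goA col s = s.take n ++ col ++ goA col (s.drop (n + 7)) := by
  induction n generalizing s with
  | zero =>
      simp at hget
      obtain ⟨l', hl, -⟩ := List.cons_prefix_iff.mp hget
      subst hl
      rw [goA]
      simp
  | succ n ih =>
      cases s with
      | nil => simp at hget
      | cons c rest =>
          have hc : c ≠ '#' := by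
            intro hc
            exact hbefore 0 (by omega) (by simp [hc])
          rw [goA]
          simp only [if_neg hc]
          have hrec : goA col rest = rest.take n ++ col ++ goA col (rest.drop (n + 7)) := by
            apply ih
            · simpa using hget
            · intro j hj
              simpa using hbefore (j+1) (by omega)
          rw [hrec]
          simp

-- ''.join is concatenation
theorem join_eq_flatten (ps : List (List Char)) : PySem.Chars.join [] ps = ps.flatten := by
  induction ps with
  | nil => simp [PySem.Chars.join_nil]
  | cons p rest ih =>
      cases rest with
      | nil => simp [PySem.Chars.join_singleton]
      | cons q qs =>
          rw [PySem.Chars.join_cons_cons, ih]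
          simp

-- main invariant: A's output equals the concatenation of B's parts
theorem goA_eq_flatten_goB (col : List Char) (s : List Char) :
    goA col s = (goB col s).flatten := by
  induction s using goB.induct with
  | case1 s i hlt =>
      rw [goB]
      rw [if_pos hlt]
      have heq : PySem.Chars.find s ['#'] = -1 := by
        have := PySem.Chars.neg_one_le_find s ['#']
        omega
      have hnin : '#' ∉ s := by
        intro hmem
        exact (PySem.Chars.find_eq_neg_one_iff s ['#']).mp heq
          ((List.singleton_infix_iff '#' s).mpr hmem)
      simp [goA_no_hash col s hnin]
  | case2 s i hlt ih =>
      rw [goB]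
      rw [if_neg hlt]
      have hne : PySem.Chars.find s ['#'] ≠ -1 := by omega
      have hspec := PySem.Chars.findFrom_natCast_spec s ['#'] 0 (by omega)
        (by rw [Nat.cast_zero, PySem.Chars.findFrom_zero]; exact hne)
      rw [Nat.cast_zero, PySem.Chars.findFrom_zero] at hspec
      obtain ⟨-, hpre, hmin⟩ := hspec
      rw [goA_skip col (PySem.Chars.find s ['#']).toNat s hpre
        (fun j hj => hmin j (by omega) hj)]
      rw [ih]
      simp
      rfl

-- ===== VERDICT (by name: the statement is the Claim_ definition above) =====
theorem replace_hex_color_spec : Claim_equal_replace_hex_color := by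
  intro string col _
  unfold Spec_replace_hex_color replace_hex_color replace_hex_color_alt
  rw [join_eq_flatten, goA_eq_flatten_goB]
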